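-- pv_equiv track=rewrite | github.com/Anneroos/AdventOfCode | 2022/Day23.py | printElves
-- ===== SOURCE A (Python) =====
-- def printElves(elfDict): # Doubles as counting the number of empty spaces
--     minx = min([e[0] for e in elfDict])
--     maxx = max([e[0] for e in elfDict])
--     miny = min([e[1] for e in elfDict])
--     maxy = max([e[1] for e in elfDict])
--     emptySpots = 0
--     lines = []
--     for y in range(miny,maxy+1):
--         line = ""
--         for x in range(minx, maxx +1):
--             elfPresent = (x,y) in elfDict
--             line += "#" if (x,y) in elfDict else "."
--             if not elfPresent:
--                 emptySpots += 1
--         lines.append(line)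
--     return lines, emptySpots
-- ===== SOURCE B (Python) =====
-- def printElves(elfDict): # Doubles as counting the number of empty spaces
--     elves = set(elfDict)
--     minx = min(x for x, _ in elves)
--     maxx = max(x for x, _ in elves)
--     miny = min(y for _, y in elves)
--     maxy = max(y for _, y in elves)
--     width = maxx - minx + 1
--     height = maxy - miny + 1
--     grid = [["."] * width for _ in range(height)]
--     for x, y in elves:
--         grid[y - miny][x - minx] = "#"
--     lines = ["".join(row) for row in grid]
--     return lines, width * height - len(elves)
-- ===== Notes on version B (the rewrite author's own statement) =====
-- stated objective: faster
-- what changed: Instead of scanning every cell of the bounding box and testing membership in the elf list while accumulating an empty-cell counter, B deduplicates the elves into a set, allocates a grid of '.' rows, scatters '#' at each elf's offset position, joins rows, and computes the empty count as width*height minus the number of distinct elves.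
-- outside the precondition, e.g. on printElves(set()): A raises ValueError, B raises ValueError
import Mathlib
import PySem

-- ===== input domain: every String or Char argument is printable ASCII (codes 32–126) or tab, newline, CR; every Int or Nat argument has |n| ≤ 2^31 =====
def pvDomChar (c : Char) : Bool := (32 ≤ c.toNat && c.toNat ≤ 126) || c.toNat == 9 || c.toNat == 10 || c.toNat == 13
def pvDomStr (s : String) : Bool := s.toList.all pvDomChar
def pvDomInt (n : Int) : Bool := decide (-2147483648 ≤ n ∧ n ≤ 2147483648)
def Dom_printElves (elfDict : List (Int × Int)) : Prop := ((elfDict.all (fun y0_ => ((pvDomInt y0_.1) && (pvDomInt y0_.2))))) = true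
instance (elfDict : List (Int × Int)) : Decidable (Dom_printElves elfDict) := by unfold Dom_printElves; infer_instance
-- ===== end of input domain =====

-- B replaces A's per-cell membership scan with a running empty counter by: dedup into a set,
-- scatter '#' into a pre-allocated '.' grid, and the empty count computed as area − #distinct elves.

-- ===== PORT A =====
def printElves (elfDict : List (Int × Int)) : List String × Int :=
  match PySem.List.min? (elfDict.map (fun e => e.1)) (fun v => v),
        PySem.List.max? (elfDict.map (fun e => e.1)) (fun v => v),
        PySem.List.min? (elfDict.map (fun e => e.2)) (fun v => v),
        PySem.List.max? (elfDict.map (fun e => e.2)) (fun v => v) with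
  | some minx, some maxx, some miny, some maxy =>
    (PySem.List.pyRange miny (maxy + 1) 1).foldl
      (fun (acc : List String × Int) y =>
        let inner :=
          (PySem.List.pyRange minx (maxx + 1) 1).foldl
            (fun (p : List Char × Int) x =>
              let elfPresent := elfDict.contains (x, y)
              (p.1 ++ (if elfDict.contains (x, y) then ['#'] else ['.']),
               if !elfPresent then p.2 + 1 else p.2))
            ([], acc.2)
        (acc.1 ++ [String.ofList inner.1], inner.2))
      ([], 0)
  | _, _, _, _ => ([], 0)   -- unreachable under Pre_ (Python raises ValueError on an empty list)

-- ===== PORT B =====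
def printElves_alt (elfDict : List (Int × Int)) : List String × Int :=
  -- the four Option.casesOn are B's four min()/max() calls; the 'none' branches are
  -- unreachable under Pre_ (Python raises ValueError on an empty set)
  let elves := PySem.Set.ofList elfDict
  Option.casesOn (PySem.List.min? (elves.map (fun e => e.1)) (fun v => v)) ([], 0) (fun minx =>
    Option.casesOn (PySem.List.max? (elves.map (fun e => e.1)) (fun v => v)) ([], 0) (fun maxx =>
      Option.casesOn (PySem.List.min? (elves.map (fun e => e.2)) (fun v => v)) ([], 0) (fun miny =>
        Option.casesOn (PySem.List.max? (elves.map (fun e => e.2)) (fun v => v)) ([], 0) (fun maxy =>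
          let width := maxx - minx + 1
          let height := maxy - miny + 1
          let grid := elves.foldl
            (fun (g : List (List Char)) e =>
              PySem.List.pySetD g (e.2 - miny)
                (PySem.List.pySetD (PySem.List.pyGetD g (e.2 - miny) []) (e.1 - minx) '#'))
            (List.replicate height.toNat (List.replicate width.toNat '.'))
          (grid.map String.ofList, width * height - PySem.Set.len elves)))))

-- ===== PRECONDITION & SPEC =====
-- Pre_ excludes only the empty list, on which Python's min([]) raises ValueError (in A and in B alike).
def Pre_printElves (elfDict : List (Int × Int)) : Prop := elfDict ≠ []
instance (elfDict : List (Int × Int)) : Decidable (Pre_printElves elfDict) := by unfold Pre_printElves; infer_instance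
def pvWitness_printElves : (List (Int × Int)) := [(0, 0), (2, 1), (0, 0)]

def Spec_printElves (elfDict : List (Int × Int)) (out : List String × Int) : Prop := out = printElves_alt elfDict
instance (elfDict : List (Int × Int)) (out : List String × Int) : Decidable (Spec_printElves elfDict out) := by unfold Spec_printElves; infer_instance

-- ===== CLAIM (what is proved, stated in full; the proofs are below) =====
def Claim_equal_printElves : Prop := ∀ (elfDict : List (Int × Int)), Dom_printElves elfDict → Pre_printElves elfDict → Spec_printElves elfDict (printElves elfDict)

-- ===== LEMMAS AND PROOFS =====

-- min/max over two lists with the same elements agree (A scans the raw list, B the deduplicated set)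
theorem pvMinEq (xs ys : List Int) (hm : ∀ a, a ∈ xs ↔ a ∈ ys) :
    PySem.List.min? xs (fun v => v) = PySem.List.min? ys (fun v => v) := by
  cases hx : PySem.List.min? xs (fun v => v) with
  | none =>
    rw [PySem.List.min?_eq_none_iff] at hx
    cases hy : PySem.List.min? ys (fun v => v) with
    | none => rfl
    | some b =>
      have hb := PySem.List.min?_mem hy
      rw [← hm] at hb
      simp [hx] at hb
  | some a =>
    cases hy : PySem.List.min? ys (fun v => v) with
    | none =>
      rw [PySem.List.min?_eq_none_iff] at hy
      have ha := PySem.List.min?_mem hx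
      rw [hm] at ha
      simp [hy] at ha
    | some b =>
      have hab := PySem.List.min?_isMin hx b ((hm b).mpr (PySem.List.min?_mem hy))
      have hba := PySem.List.min?_isMin hy a ((hm a).mp (PySem.List.min?_mem hx))
      simp only [Option.some.injEq]
      omega

theorem pvMaxEq (xs ys : List Int) (hm : ∀ a, a ∈ xs ↔ a ∈ ys) :
    PySem.List.max? xs (fun v => v) = PySem.List.max? ys (fun v => v) := by
  cases hx : PySem.List.max? xs (fun v => v) with
  | none =>
    rw [PySem.List.max?_eq_none_iff] at hx
    cases hy : PySem.List.max? ys (fun v => v) with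
    | none => rfl
    | some b =>
      have hb := PySem.List.max?_mem hy
      rw [← hm] at hb
      simp [hx] at hb
  | some a =>
    cases hy : PySem.List.max? ys (fun v => v) with
    | none =>
      rw [PySem.List.max?_eq_none_iff] at hy
      have ha := PySem.List.max?_mem hx
      rw [hm] at ha
      simp [hy] at ha
    | some b =>
      have hab := PySem.List.max?_isMax hx b ((hm b).mpr (PySem.List.max?_mem hy))
      have hba := PySem.List.max?_isMax hy a ((hm a).mp (PySem.List.max?_mem hx))
      simp only [Option.some.injEq]
      omega

-- A's inner loop: builds the row by appending one char per x and counts the empty cells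
theorem pvFoldInner (c : Int → Bool) (l : List Int) (cs : List Char) (n : Int) :
    l.foldl
      (fun (p : List Char × Int) x =>
        let elfPresent := c x
        (p.1 ++ (if c x then ['#'] else ['.']), if !elfPresent then p.2 + 1 else p.2))
      (cs, n)
    = (cs ++ l.map (fun x => if c x then '#' else '.'), n + (l.countP (fun x => !(c x)) : Int)) := by
  induction l generalizing cs n with
  | nil => simp
  | cons x t ih =>
    simp only [List.foldl_cons, List.map_cons, List.countP_cons, ih]
    cases hx : c x <;> simp <;> push_cast <;> ring

-- A's outer loop: one row string and one count increment per y
theorem pvFoldOuter (row : Int → List Char) (cnt : Int → Int) (l : List Int) (a : List String) (n : Int) :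
    l.foldl (fun (acc : List String × Int) y => (acc.1 ++ [String.ofList (row y)], acc.2 + cnt y)) (a, n)
    = (a ++ l.map (fun y => String.ofList (row y)), n + (l.map cnt).sum) := by
  induction l generalizing a n with
  | nil => simp
  | cons y t ih =>
    simp only [List.foldl_cons, List.map_cons, List.sum_cons, ih]
    refine Prod.ext ?_ ?_
    · simp
    · simp only []
      ring

-- the grid as a function of the set of cells already marked '#'
def pvGridOf (minx miny : Int) (w h : Nat) (P : Int × Int → Bool) : List (List Char) :=
  (List.range h).map (fun (r : Nat) => (List.range w).map (fun (c : Nat) => if P (minx + (c : Int), miny + (r : Int)) then '#' else '.'))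

theorem pvGridOf_false (minx miny : Int) (w h : Nat) :
    pvGridOf minx miny w h (fun _ => false) = List.replicate h (List.replicate w '.') := by
  simp [pvGridOf, List.map_const']

theorem pvScatterStep (minx miny : Int) (w h : Nat) (P : Int × Int → Bool) (e : Int × Int)
    (hx0 : 0 ≤ e.1 - minx) (hx1 : (e.1 - minx).toNat < w)
    (hy0 : 0 ≤ e.2 - miny) (hy1 : (e.2 - miny).toNat < h) :
    PySem.List.pySetD (pvGridOf minx miny w h P) (e.2 - miny)
      (PySem.List.pySetD (PySem.List.pyGetD (pvGridOf minx miny w h P) (e.2 - miny) []) (e.1 - minx) '#')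
    = pvGridOf minx miny w h (fun q => P q || (q == e)) := by
  obtain ⟨x, y⟩ := e
  simp only at hx0 hx1 hy0 hy1
  set r0 : Nat := (y - miny).toNat with hr0
  set c0 : Nat := (x - minx).toNat with hc0
  have hyc : y - miny = (r0 : Int) := by omega
  have hxc : x - minx = (c0 : Int) := by omega
  have hlen : (pvGridOf minx miny w h P).length = h := by simp [pvGridOf]
  have hrow : PySem.List.pyGetD (pvGridOf minx miny w h P) (y - miny) []
      = (List.range w).map (fun (c : Nat) => if P (minx + (c : Int), miny + (r0 : Int)) then '#' else '.') := by
    rw [hyc, PySem.List.pyGetD_natCast, List.getD_eq_getElem _ _ (by omega)]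
    simp only [pvGridOf, List.getElem_map, List.getElem_range]
  rw [hrow]
  have hinner : PySem.List.pySetD
      ((List.range w).map (fun (c : Nat) => if P (minx + (c : Int), miny + (r0 : Int)) then '#' else '.'))
      (x - minx) '#'
      = (List.range w).map
          (fun (c : Nat) => if (P (minx + (c : Int), miny + (r0 : Int)) || ((minx + (c : Int), miny + (r0 : Int)) == (x, y))) then '#' else '.') := by
    rw [hxc]
    unfold PySem.List.pySetD
    rw [PySem.List.pySet?_natCast _ _ _ (by simp; omega)]
    simp only [Option.getD_some]
    apply List.ext_getElem
    · simp
    · intro i h1 h2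
      simp only [List.getElem_set, List.getElem_map, List.getElem_range]
      by_cases hic : c0 = i
      · subst hic
        have : (minx + (c0 : Int), miny + (r0 : Int)) == (x, y) := by
          simp [Prod.ext_iff]
          omega
        simp [this]
      · have : ¬ ((minx + (i : Int), miny + (r0 : Int)) == (x, y)) = true := by
          simp [Prod.ext_iff]
          intro hxi
          omega
        simp only [hic, if_false]
        rw [Bool.eq_false_iff.mpr this]
        simp
  rw [hinner]
  rw [hyc]
  unfold PySem.List.pySetD
  rw [PySem.List.pySet?_natCast _ _ _ (by rw [hlen]; omega)]
  simp only [Option.getD_some]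
  apply List.ext_getElem
  · simp [pvGridOf]
  · intro i h1 h2
    simp only [pvGridOf, List.getElem_set, List.getElem_map, List.getElem_range] at *
    by_cases hir : r0 = i
    · subst hir
      simp
    · have hne : ∀ c : Nat, ¬ ((minx + (c : Int), miny + (i : Int)) == (x, y)) = true := by
        intro c
        simp [Prod.ext_iff]
        intro _
        omega
      simp only [hir, if_false]
      apply List.ext_getElem
      · simp
      · intro j h3 h4
        simp only [List.getElem_map, List.getElem_range]
        rw [Bool.eq_false_iff.mpr (hne j)]
        simp

theorem pvScatter (minx miny : Int) (w h : Nat) (T : List (Int × Int)) (P : Int × Int → Bool)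
    (hT : ∀ e ∈ T, 0 ≤ e.1 - minx ∧ (e.1 - minx).toNat < w ∧ 0 ≤ e.2 - miny ∧ (e.2 - miny).toNat < h) :
    T.foldl
      (fun (g : List (List Char)) e =>
        PySem.List.pySetD g (e.2 - miny)
          (PySem.List.pySetD (PySem.List.pyGetD g (e.2 - miny) []) (e.1 - minx) '#'))
      (pvGridOf minx miny w h P)
    = pvGridOf minx miny w h (fun q => P q || T.contains q) := by
  induction T generalizing P with
  | nil => simp
  | cons e t ih =>
    obtain ⟨he, ht⟩ := List.forall_mem_cons.mp hT
    rw [List.foldl_cons, pvScatterStep minx miny w h P e he.1 he.2.1 he.2.2.1 he.2.2.2, ih _ ht]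
    have : (fun q => (P q || (q == e)) || t.contains q) = (fun q => P q || (e :: t).contains q) := by
      funext q
      rw [Bool.or_assoc, List.contains_cons]
    rw [this]

-- counting helpers
theorem pvCountPOr {α : Type} (p q : α → Bool) (l : List α)
    (hd : ∀ a ∈ l, p a = true → q a = false) :
    l.countP (fun a => p a || q a) = l.countP p + l.countP q := by
  induction l with
  | nil => simp
  | cons x t ih =>
    have ih' := ih (fun a ha hp => hd a (List.mem_cons_of_mem x ha) hp)
    simp only [List.countP_cons, ih']
    cases hp : p x
    · simp
      omega
    · have hq := hd x (List.mem_cons_self) hp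
      simp [hq]
      omega

theorem pvCountNeg {α : Type} (p : α → Bool) (l : List α) :
    l.countP (fun a => !(p a)) = l.length - l.countP p := by
  induction l with
  | nil => simp
  | cons x t ih =>
    simp only [List.countP_cons, ih, List.length_cons]
    have := @List.countP_le_length _ p t
    cases hp : p x <;> simp <;> omega

theorem pvSumIndicator (a : Int) (l : List Int) (hnd : l.Nodup) (hmem : a ∈ l) :
    (l.map (fun y => if y = a then (1 : Int) else 0)).sum = 1 := by
  induction l with
  | nil => simp at hmem
  | cons x t ih =>
    simp only [List.map_cons, List.sum_cons]
    rcases List.mem_cons.mp hmem with h | h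
    · subst h
      have hx : a ∉ t := (List.nodup_cons.mp hnd).1
      have : (t.map (fun y => if y = a then (1 : Int) else 0)).sum = 0 := by
        rw [List.sum_eq_zero]
        intro z hz
        rcases List.mem_map.mp hz with ⟨y, hy, rfl⟩
        have : y ≠ a := fun hya => hx (hya ▸ hy)
        simp [this]
      simp [this]
    · have hx : x ≠ a := by
        rintro rfl
        exact (List.nodup_cons.mp hnd).1 h
      rw [ih (List.nodup_cons.mp hnd).2 h]
      simp [hx]

-- the number of marked cells in the bounding box is the number of distinct elves
theorem pvCountScatter (minx maxx miny maxy : Int) (S : List (Int × Int)) (hnd : S.Nodup)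
    (hb : ∀ e ∈ S, minx ≤ e.1 ∧ e.1 ≤ maxx ∧ miny ≤ e.2 ∧ e.2 ≤ maxy) :
    ((PySem.List.pyRange miny (maxy + 1) 1).map
        (fun y => ((PySem.List.pyRange minx (maxx + 1) 1).countP (fun x => S.contains (x, y)) : Int))).sum
    = (S.length : Int) := by
  revert hnd hb
  induction S with
  | nil => simp
  | cons e S' ih =>
    intro hnd hb
    obtain ⟨hne, hnd'⟩ := List.nodup_cons.mp hnd
    obtain ⟨hbe, hbS⟩ := List.forall_mem_cons.mp hb
    have hsplit : ∀ y : Int,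
        (PySem.List.pyRange minx (maxx + 1) 1).countP (fun x => (e :: S').contains (x, y))
        = (PySem.List.pyRange minx (maxx + 1) 1).countP (fun x => (x, y) == e)
          + (PySem.List.pyRange minx (maxx + 1) 1).countP (fun x => S'.contains (x, y)) := by
      intro y
      have hc : (fun (x : Int) => (e :: S').contains (x, y)) = fun x => ((x, y) == e) || S'.contains (x, y) := by
        funext x
        rw [List.contains_cons]
      rw [hc]
      apply pvCountPOr
      intro x hx hpx
      have hxe : (x, y) = e := by simpa using hpx
      refine Bool.not_eq_true _ |>.mp ?_
      intro hmem
      rw [List.contains_iff_mem] at hmem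
      exact hne (hxe ▸ hmem)
    have hmapeq : (PySem.List.pyRange miny (maxy + 1) 1).map
          (fun y => (((PySem.List.pyRange minx (maxx + 1) 1).countP (fun x => (e :: S').contains (x, y)) : Nat) : Int))
        = (PySem.List.pyRange miny (maxy + 1) 1).map
          (fun y => (((PySem.List.pyRange minx (maxx + 1) 1).countP (fun x => (x, y) == e) : Nat) : Int)
            + (((PySem.List.pyRange minx (maxx + 1) 1).countP (fun x => S'.contains (x, y)) : Nat) : Int)) := by
      apply List.map_congr_left
      intro y _
      rw [hsplit y]
      push_cast
      ring
    rw [hmapeq, PySem.List.sum_map_add_int, ih hnd' hbS]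
    have hone : ∀ y : Int,
        (((PySem.List.pyRange minx (maxx + 1) 1).countP (fun x => (x, y) == e) : Nat) : Int)
        = if y = e.2 then 1 else 0 := by
      intro y
      by_cases hy : y = e.2
      · have hcp : (PySem.List.pyRange minx (maxx + 1) 1).countP (fun x => (x, y) == e)
            = (PySem.List.pyRange minx (maxx + 1) 1).countP (fun x => x == e.1) := by
          apply List.countP_congr
          intro x _
          obtain ⟨e1, e2⟩ := e
          simp only [Prod.snd] at hy
          subst hy
          simp [Prod.ext_iff]
        have hcount : (PySem.List.pyRange minx (maxx + 1) 1).countP (fun x => x == e.1)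
            = (PySem.List.pyRange minx (maxx + 1) 1).count e.1 := rfl
        have hmem : e.1 ∈ PySem.List.pyRange minx (maxx + 1) 1 :=
          PySem.List.mem_pyRange_one.mpr ⟨hbe.1, by omega⟩
        rw [hcp, hcount, List.count_eq_one_of_mem (PySem.List.nodup_pyRange_one _ _) hmem]
        simp [hy]
      · have hz : (PySem.List.pyRange minx (maxx + 1) 1).countP (fun x => (x, y) == e) = 0 := by
          rw [List.countP_eq_zero]
          intro x _
          simp only [beq_iff_eq]
          intro hxe
          exact hy (congrArg Prod.snd hxe)
        rw [hz]
        simp [hy]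
    have hmap2 : (PySem.List.pyRange miny (maxy + 1) 1).map
          (fun y => (((PySem.List.pyRange minx (maxx + 1) 1).countP (fun x => (x, y) == e) : Nat) : Int))
        = (PySem.List.pyRange miny (maxy + 1) 1).map (fun y => if y = e.2 then (1 : Int) else 0) := by
      apply List.map_congr_left
      intro y _
      exact hone y
    rw [hmap2, pvSumIndicator e.2 _ (PySem.List.nodup_pyRange_one _ _)
          (PySem.List.mem_pyRange_one.mpr ⟨hbe.2.2.1, by omega⟩)]
    simp
    ring

theorem pvSumSub (c : Int) (f : Int → Int) (l : List Int) :
    (l.map (fun y => c - f y)).sum = l.length * c - (l.map f).sum := by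
  induction l with
  | nil => simp
  | cons y t ih =>
    simp only [List.map_cons, List.sum_cons, List.length_cons, ih]
    push_cast
    ring

-- ===== VERDICT (by name: the statement is the Claim_ definition above) =====
theorem printElves_spec : Claim_equal_printElves := by
  unfold Claim_equal_printElves
  intro L _ hpre
  unfold Pre_printElves at hpre
  unfold Spec_printElves
  -- the deduplicated elf set and its basic facts
  have hmemS : ∀ q, q ∈ PySem.Set.ofList L ↔ q ∈ L := PySem.Set.mem_ofList L
  have hndS : (PySem.Set.ofList L).Nodup := PySem.Set.nodup_ofList L
  -- the four extrema exist and agree between the raw list and the set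
  obtain ⟨e0, he0⟩ : ∃ e, e ∈ L := List.exists_mem_of_ne_nil L hpre
  have hmx : ∀ (f : Int × Int → Int) a, a ∈ L.map f ↔ a ∈ (PySem.Set.ofList L).map f := by
    intro f a
    constructor
    · intro ha
      obtain ⟨e, he, rfl⟩ := List.mem_map.mp ha
      exact List.mem_map_of_mem ((hmemS e).mpr he)
    · intro ha
      obtain ⟨e, he, rfl⟩ := List.mem_map.mp ha
      exact List.mem_map_of_mem ((hmemS e).mp he)
  rcases h1 : PySem.List.min? (L.map (fun e => e.1)) (fun v => v) with _ | minx
  · rw [PySem.List.min?_eq_none_iff] at h1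
    exact absurd (List.map_eq_nil_iff.mp h1) hpre
  rcases h2 : PySem.List.max? (L.map (fun e => e.1)) (fun v => v) with _ | maxx
  · rw [PySem.List.max?_eq_none_iff] at h2
    exact absurd (List.map_eq_nil_iff.mp h2) hpre
  rcases h3 : PySem.List.min? (L.map (fun e => e.2)) (fun v => v) with _ | miny
  · rw [PySem.List.min?_eq_none_iff] at h3
    exact absurd (List.map_eq_nil_iff.mp h3) hpre
  rcases h4 : PySem.List.max? (L.map (fun e => e.2)) (fun v => v) with _ | maxy
  · rw [PySem.List.max?_eq_none_iff] at h4
    exact absurd (List.map_eq_nil_iff.mp h4) hpre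
  have h1' : PySem.List.min? ((PySem.Set.ofList L).map (fun e => e.1)) (fun v => v) = some minx := by
    rw [← pvMinEq _ _ (hmx (fun e => e.1))]; exact h1
  have h2' : PySem.List.max? ((PySem.Set.ofList L).map (fun e => e.1)) (fun v => v) = some maxx := by
    rw [← pvMaxEq _ _ (hmx (fun e => e.1))]; exact h2
  have h3' : PySem.List.min? ((PySem.Set.ofList L).map (fun e => e.2)) (fun v => v) = some miny := by
    rw [← pvMinEq _ _ (hmx (fun e => e.2))]; exact h3
  have h4' : PySem.List.max? ((PySem.Set.ofList L).map (fun e => e.2)) (fun v => v) = some maxy := by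
    rw [← pvMaxEq _ _ (hmx (fun e => e.2))]; exact h4
  -- bounds
  have hxm : minx ≤ maxx :=
    le_trans (PySem.List.min?_isMin h1 e0.1 (List.mem_map_of_mem he0))
      (PySem.List.max?_isMax h2 e0.1 (List.mem_map_of_mem he0))
  have hym : miny ≤ maxy :=
    le_trans (PySem.List.min?_isMin h3 e0.2 (List.mem_map_of_mem he0))
      (PySem.List.max?_isMax h4 e0.2 (List.mem_map_of_mem he0))
  have hbnd : ∀ e ∈ PySem.Set.ofList L, minx ≤ e.1 ∧ e.1 ≤ maxx ∧ miny ≤ e.2 ∧ e.2 ≤ maxy := by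
    intro e he
    have heL := (hmemS e).mp he
    exact ⟨PySem.List.min?_isMin h1 e.1 (List.mem_map_of_mem heL),
           PySem.List.max?_isMax h2 e.1 (List.mem_map_of_mem heL),
           PySem.List.min?_isMin h3 e.2 (List.mem_map_of_mem heL),
           PySem.List.max?_isMax h4 e.2 (List.mem_map_of_mem heL)⟩
  -- reduce the two ports
  unfold printElves printElves_alt
  simp only [h1, h2, h3, h4, h1', h2', h3', h4']
  -- evaluate A's two nested loops
  simp only [pvFoldInner, List.nil_append]
  rw [pvFoldOuter (fun y => (PySem.List.pyRange minx (maxx + 1) 1).map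
        (fun x => if L.contains (x, y) then '#' else '.'))
      (fun y => ((PySem.List.pyRange minx (maxx + 1) 1).countP (fun x => !(L.contains (x, y))) : Int))]
  -- evaluate B's scatter loop
  rw [← pvGridOf_false minx miny (maxx - minx + 1).toNat (maxy - miny + 1).toNat,
      pvScatter minx miny _ _ (PySem.Set.ofList L) _ (by
        intro e he
        have h := hbnd e he
        refine ⟨by omega, by omega, by omega, by omega⟩)]
  have hcontains : ∀ q : Int × Int, L.contains q = List.contains (PySem.Set.ofList L) q := by
    intro q
    rw [Bool.eq_iff_iff, List.contains_iff_mem, List.contains_iff_mem]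
    exact (hmemS q).symm
  have hPred : (fun q => false || List.contains (PySem.Set.ofList L) q)
      = fun q : Int × Int => L.contains q := by
    funext q
    rw [hcontains q]
    simp
  rw [hPred]
  have heq1 : maxy + 1 - miny = maxy - miny + 1 := by ring
  have heq2 : maxx + 1 - minx = maxx - minx + 1 := by ring
  have hyr : PySem.List.pyRange miny (maxy + 1) 1
      = (List.range (maxy - miny + 1).toNat).map (fun k : Nat => miny + (k : Int)) := by
    rw [PySem.List.pyRange_one, heq1]
  have hxr : PySem.List.pyRange minx (maxx + 1) 1
      = (List.range (maxx - minx + 1).toNat).map (fun k : Nat => minx + (k : Int)) := by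
    rw [PySem.List.pyRange_one, heq2]
  refine Prod.ext ?_ ?_
  · -- the rendered lines agree
    simp only [List.nil_append, hyr, hxr, pvGridOf, List.map_map]
    apply List.map_congr_left
    intro r _
    simp only [Function.comp_def]
  · -- the empty-space counts agree
    simp only []
    have hlenx : ((PySem.List.pyRange minx (maxx + 1) 1).length : Int) = maxx - minx + 1 := by
      rw [PySem.List.length_pyRange_one]
      omega
    have hleny : ((PySem.List.pyRange miny (maxy + 1) 1).length : Int) = maxy - miny + 1 := by
      rw [PySem.List.length_pyRange_one]
      omega
    have hcnt : ∀ y : Int,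
        (((PySem.List.pyRange minx (maxx + 1) 1).countP (fun x => !(L.contains (x, y))) : Nat) : Int)
        = (maxx - minx + 1)
          - (((PySem.List.pyRange minx (maxx + 1) 1).countP (fun x => List.contains (PySem.Set.ofList L) (x, y)) : Nat) : Int) := by
      intro y
      have hcg : (PySem.List.pyRange minx (maxx + 1) 1).countP (fun x => L.contains (x, y))
          = (PySem.List.pyRange minx (maxx + 1) 1).countP (fun x => List.contains (PySem.Set.ofList L) (x, y)) := by
        apply List.countP_congr
        intro x _
        rw [hcontains (x, y)]
      rw [pvCountNeg, hcg, Nat.cast_sub (by rw [← hcg]; exact List.countP_le_length), hlenx]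
    have hmc : (PySem.List.pyRange miny (maxy + 1) 1).map
          (fun y => (((PySem.List.pyRange minx (maxx + 1) 1).countP (fun x => !(L.contains (x, y))) : Nat) : Int))
        = (PySem.List.pyRange miny (maxy + 1) 1).map
          (fun y => (maxx - minx + 1)
            - (((PySem.List.pyRange minx (maxx + 1) 1).countP (fun x => List.contains (PySem.Set.ofList L) (x, y)) : Nat) : Int)) := by
      apply List.map_congr_left
      intro y _
      exact hcnt y
    rw [hmc, pvSumSub, pvCountScatter minx maxx miny maxy (PySem.Set.ofList L) hndS hbnd, hleny]
    have hlen : (PySem.Set.ofList L).len = ((PySem.Set.ofList L).length : Int) := rfl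
    rw [hlen]
    ring
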